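-- pv_equiv track=rewrite | github.com/AANDREW-999/ejercicios-modulo-3-python | src/modulo3/ejercicio_4_validador_generico.py | _parse_csv_enteros
-- ===== SOURCE A (Python) =====
-- def _parse_csv_enteros(texto: str) -> tuple[list[int], list[str]]:
--     """Devuelve (numeros_validos, tokens_invalidos)."""
--     if not texto.strip():
--         return [], []
--     numeros: list[int] = []
--     invalidos: list[str] = []
--     for token in texto.split(","):
--         pieza = token.strip()
--         if not pieza:
--             continue
--         try:
--             numero = int(pieza)
--         except ValueError:
--             invalidos.append(pieza)
--         else:
--             numeros.append(numero)
--     return numeros, invalidos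
-- ===== SOURCE B (Python) =====
-- def _parse_csv_enteros(texto: str) -> tuple[list[int], list[str]]:
--     """Devuelve (numeros_validos, tokens_invalidos)."""
--     numeros: list[int] = []
--     invalidos: list[str] = []
--     pieza: list[str] = []     # chars of the current token, leading whitespace never enters
--     colgante: list[str] = []  # whitespace run seen since the last non-space char
--     for ch in texto + ",":  # sentinel delimiter ends the last token
--         if ch == ",":
--             if pieza:
--                 token = "".join(pieza)
--                 try:
--                     numeros.append(int(token))
--                 except ValueError:
--                     invalidos.append(token)
--                 pieza = []
--             colgante = []
--         elif ch.isspace():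
--             if pieza:
--                 colgante.append(ch)
--         else:
--             pieza += colgante
--             pieza.append(ch)
--             colgante = []
--     return numeros, invalidos
-- ===== Notes on version B (the rewrite author's own statement) =====
-- stated objective: alternative
-- what changed: Replaces A's split/strip/classify pipeline with a single character-level scanner (with a sentinel delimiter appended) that builds each trimmed token on the fly via a pending-whitespace buffer and classifies it when its terminating delimiter is reached; no split(), no strip(), and no blank-input guard.
import Mathlib
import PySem

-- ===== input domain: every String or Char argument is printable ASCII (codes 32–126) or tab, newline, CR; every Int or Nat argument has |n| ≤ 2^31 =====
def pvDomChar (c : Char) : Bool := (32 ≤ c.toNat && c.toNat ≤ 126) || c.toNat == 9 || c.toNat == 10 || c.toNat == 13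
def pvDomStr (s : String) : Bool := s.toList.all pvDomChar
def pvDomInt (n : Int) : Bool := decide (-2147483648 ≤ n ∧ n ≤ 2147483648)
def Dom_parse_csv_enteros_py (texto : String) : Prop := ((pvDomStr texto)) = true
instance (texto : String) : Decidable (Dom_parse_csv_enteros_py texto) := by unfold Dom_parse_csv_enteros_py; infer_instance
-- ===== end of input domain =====

-- B replaces A's split/strip/classify pipeline by one character-level scanner that trims and
-- splits tokens on the fly; same asymptotic cost, a genuinely different traversal (objective: alternative).

-- ===== PORT A =====
-- A: early return on blank input, then one loop over texto.split(',') classifying each stripped token.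
def parse_csv_enteros_py (texto : String) : List Int × List String :=
  if PySem.Chars.strip texto.toList = [] then ([], [])
  else
    (PySem.Chars.splitOn texto.toList [',']).foldl
      (fun acc token =>
        let pieza := PySem.Chars.strip token
        if pieza = [] then acc
        else
          match PySem.Int.ofChars? pieza with
          | some numero => (acc.1 ++ [numero], acc.2)
          | none => (acc.1, acc.2 ++ [String.ofList pieza]))
      ([], [])

-- ===== PORT B =====
-- one step of Source B's scanner (the loop body); state = ((numeros, invalidos), (pieza, colgante))
def pvScanStep (st : (List Int × List String) × (List Char × List Char)) (ch : Char) :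
    (List Int × List String) × (List Char × List Char) :=
  let ((numeros, invalidos), (pieza, colgante)) := st
  if ch = ',' then
    if pieza ≠ [] then
      match PySem.Int.ofChars? pieza with
      | some n => ((numeros ++ [n], invalidos), ([], []))
      | none => ((numeros, invalidos ++ [String.ofList pieza]), ([], []))
    else ((numeros, invalidos), (pieza, []))
  else if PySem.Chars.isspace ch then
    if pieza ≠ [] then ((numeros, invalidos), (pieza, colgante ++ [ch]))
    else ((numeros, invalidos), (pieza, colgante))
  else ((numeros, invalidos), (pieza ++ colgante ++ [ch], []))

def parse_csv_enteros_py_alt (texto : String) : List Int × List String :=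
  ((texto.toList ++ [',']).foldl pvScanStep (([], []), ([], []))).1

-- ===== PRECONDITION & SPEC =====
def Spec_parse_csv_enteros_py (texto : String) (out : List Int × List String) : Prop := out = parse_csv_enteros_py_alt texto
instance (texto : String) (out : List Int × List String) : Decidable (Spec_parse_csv_enteros_py texto out) := by unfold Spec_parse_csv_enteros_py; infer_instance

-- ===== CLAIM (what is proved, stated in full; the proofs are below) =====
def Claim_equal_parse_csv_enteros_py : Prop := ∀ (texto : String), Dom_parse_csv_enteros_py texto → Spec_parse_csv_enteros_py texto (parse_csv_enteros_py texto)

-- ===== LEMMAS AND PROOFS =====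

-- A's per-token classification step, named for the proofs
def pvClassify (acc : List Int × List String) (token : List Char) : List Int × List String :=
  let pieza := PySem.Chars.strip token
  if pieza = [] then acc
  else
    match PySem.Int.ofChars? pieza with
    | some numero => (acc.1 ++ [numero], acc.2)
    | none => (acc.1, acc.2 ++ [String.ofList pieza])

-- simple recursion computing split on a single comma
def pvSplitComma : List Char → List (List Char)
  | [] => [[]]
  | c :: rest => if c = ',' then [] :: pvSplitComma rest
                 else (pvSplitComma rest).modifyHead (fun t => c :: t)

lemma pvSplitComma_ne_nil (cs : List Char) : pvSplitComma cs ≠ [] := by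
  cases cs with
  | nil => simp [pvSplitComma]
  | cons c rest =>
    simp only [pvSplitComma]
    split
    · simp
    · cases h : pvSplitComma rest with
      | nil => exact absurd h (pvSplitComma_ne_nil rest)
      | cons t ts => simp

lemma splitOn_go_eq (fuel : Nat) (l cur : List Char) (acc : List (List Char))
    (h : l.length < fuel) :
    PySem.Chars.splitOn.go [','] fuel l cur acc =
      acc.reverse ++ (pvSplitComma l).modifyHead (fun t => cur.reverse ++ t) := by
  induction fuel generalizing l cur acc with
  | zero => omega
  | succ fuel ih =>
    cases l with
    | nil =>
      unfold PySem.Chars.splitOn.go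
      simp [pvSplitComma]
    | cons c rest =>
      unfold PySem.Chars.splitOn.go
      by_cases hp : List.isPrefixOf [','] (c :: rest) = true
      · have hc : c = ',' := by
          have h2 := hp
          simp [List.isPrefixOf] at h2
          exact h2.symm
        rw [if_pos hp]
        rw [ih _ _ _ (by simp at h ⊢; omega)]
        subst hc
        obtain ⟨t0, ts, hts⟩ := List.exists_cons_of_ne_nil (pvSplitComma_ne_nil rest)
        simp [pvSplitComma, hts]
      · have hc : ¬ c = ',' := fun hcc => hp (by simp [List.isPrefixOf, hcc])
        rw [if_neg hp]
        rw [ih _ _ _ (by simp at h ⊢; omega)]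
        simp only [pvSplitComma, if_neg hc]
        obtain ⟨t0, ts, hts⟩ := List.exists_cons_of_ne_nil (pvSplitComma_ne_nil rest)
        rw [hts]
        simp

lemma splitOn_eq_pvSplitComma (cs : List Char) :
    PySem.Chars.splitOn cs [','] = pvSplitComma cs := by
  rw [PySem.Chars.splitOn, splitOn_go_eq _ _ _ _ (by omega)]
  obtain ⟨t0, ts, hts⟩ := List.exists_cons_of_ne_nil (pvSplitComma_ne_nil cs)
  rw [hts]
  simp

lemma pvSplitComma_no_comma (cs : List Char) :
    ∀ t ∈ pvSplitComma cs, ',' ∉ t := by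
  induction cs with
  | nil => simp [pvSplitComma]
  | cons c rest ih =>
    intro t ht
    simp only [pvSplitComma] at ht
    by_cases hc : c = ','
    · rw [if_pos hc] at ht
      rcases List.mem_cons.1 ht with h | h
      · subst h; simp
      · exact ih t h
    · rw [if_neg hc] at ht
      obtain ⟨t0, ts, hts⟩ := List.exists_cons_of_ne_nil (pvSplitComma_ne_nil rest)
      rw [hts] at ht
      simp only [List.modifyHead_cons] at ht
      rcases List.mem_cons.1 ht with h | h
      · subst h
        intro hmem
        rcases List.mem_cons.1 hmem with h1 | h1
        · exact hc h1.symm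
        · exact ih t0 (hts ▸ List.mem_cons_self ..) h1
      · exact ih t (hts ▸ List.mem_cons_of_mem _ h)

lemma pvSplitComma_flatten (cs : List Char) :
    (pvSplitComma cs).flatMap (fun t => t ++ [',']) = cs ++ [','] := by
  induction cs with
  | nil => simp [pvSplitComma]
  | cons c rest ih =>
    simp only [pvSplitComma]
    by_cases hc : c = ','
    · subst hc; simp [ih]
    · rw [if_neg hc]
      obtain ⟨t0, ts, hts⟩ := List.exists_cons_of_ne_nil (pvSplitComma_ne_nil rest)
      rw [hts]
      rw [hts] at ih
      simp only [List.modifyHead_cons, List.flatMap_cons] at ih ⊢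
      simp [ih]

lemma pvSplitComma_mem_chars (cs : List Char) :
    ∀ t ∈ pvSplitComma cs, ∀ c ∈ t, c ∈ cs := by
  induction cs with
  | nil => simp [pvSplitComma]
  | cons c rest ih =>
    intro t ht d hd
    simp only [pvSplitComma] at ht
    by_cases hc : c = ','
    · rw [if_pos hc] at ht
      rcases List.mem_cons.1 ht with h | h
      · subst h; simp at hd
      · exact List.mem_cons_of_mem _ (ih t h d hd)
    · rw [if_neg hc] at ht
      obtain ⟨t0, ts, hts⟩ := List.exists_cons_of_ne_nil (pvSplitComma_ne_nil rest)
      rw [hts] at ht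
      simp only [List.modifyHead_cons] at ht
      rcases List.mem_cons.1 ht with h | h
      · subst h
        rcases List.mem_cons.1 hd with h1 | h1
        · exact h1 ▸ List.mem_cons_self ..
        · exact List.mem_cons_of_mem _ (ih t0 (hts ▸ List.mem_cons_self ..) d h1)
      · exact List.mem_cons_of_mem _ (ih t (hts ▸ List.mem_cons_of_mem _ h) d hd)

lemma strip_nil_iff (s : List Char) :
    PySem.Chars.strip s = [] ↔ ∀ c ∈ s, PySem.Chars.isspace c = true := by
  simp [PySem.Chars.strip, PySem.Chars.lstrip, PySem.Chars.rstrip,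
        List.dropWhile_eq_nil_iff]
  constructor
  · intro h c hc
    rcases List.mem_append.1 ((List.takeWhile_append_dropWhile (p := PySem.Chars.isspace) (l := s)) ▸ hc) with h1 | h1
    · exact List.mem_takeWhile_imp h1
    · exact h c h1
  · intro h c hc
    exact h c ((List.dropWhile_sublist _).mem hc)

lemma rstrip_all_space (l : List Char) (h : ∀ c ∈ l, PySem.Chars.isspace c = true) :
    PySem.Chars.rstrip l = [] := by
  simp [PySem.Chars.rstrip, List.dropWhile_eq_nil_iff]
  intro c hc
  exact h c hc

lemma rstrip_append_nonspace (xs : List Char) (ch : Char) (rest : List Char)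
    (h : PySem.Chars.isspace ch = false) :
    PySem.Chars.rstrip (xs ++ ch :: rest) = xs ++ ch :: PySem.Chars.rstrip rest := by
  have hrev : (xs ++ ch :: rest).reverse = rest.reverse ++ ch :: xs.reverse := by simp
  rw [PySem.Chars.rstrip, PySem.Chars.rstrip, hrev, List.dropWhile_append]
  split_ifs with he
  · have h0 : rest.reverse.dropWhile PySem.Chars.isspace = [] := by simpa using he
    rw [List.dropWhile_cons_of_neg (by simp [h]), h0]
    simp
  · simp

-- scanner over a comma-free chunk, current token nonempty
lemma scan_chunk : ∀ (l : List Char), ',' ∉ l →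
    ∀ (n : List Int) (i : List String) (cur trail : List Char), cur ≠ [] →
      (∀ c ∈ trail, PySem.Chars.isspace c = true) →
      ∃ tr', (∀ c ∈ tr', PySem.Chars.isspace c = true) ∧
        l.foldl pvScanStep ((n, i), (cur, trail)) =
          ((n, i), (cur ++ PySem.Chars.rstrip (trail ++ l), tr')) := by
  intro l
  induction l with
  | nil =>
    intro _ n i cur trail hcur htrail
    refine ⟨trail, htrail, ?_⟩
    simp [rstrip_all_space trail htrail]
  | cons ch rest ih =>
    intro hl n i cur trail hcur htrail
    have hrest : ',' ∉ rest := fun hr => hl (List.mem_cons_of_mem _ hr)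
    have hch : ¬ ch = ',' := fun hc => hl (hc ▸ List.mem_cons_self ..)
    rw [List.foldl_cons]
    by_cases hsp : PySem.Chars.isspace ch = true
    · have step : pvScanStep ((n, i), (cur, trail)) ch = ((n, i), (cur, trail ++ [ch])) := by
        simp [pvScanStep, hch, hsp, hcur]
      rw [step]
      obtain ⟨tr', htr', heq⟩ := ih hrest n i cur (trail ++ [ch]) hcur
        (by intro c hc
            rcases List.mem_append.1 hc with h1 | h1
            · exact htrail c h1
            · simp at h1; subst h1; exact hsp)
      refine ⟨tr', htr', ?_⟩
      rw [heq]
      simp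
    · have hspf : PySem.Chars.isspace ch = false := by
        exact Bool.not_eq_true _ ▸ (by simpa using hsp)
      have step : pvScanStep ((n, i), (cur, trail)) ch
          = ((n, i), (cur ++ trail ++ [ch], [])) := by
        simp [pvScanStep, hch, hspf]
      rw [step]
      obtain ⟨tr', htr', heq⟩ := ih hrest n i (cur ++ trail ++ [ch]) [] (by simp) (by simp)
      refine ⟨tr', htr', ?_⟩
      rw [heq, rstrip_append_nonspace trail ch rest hspf]
      simp

-- whitespace-only input leaves the fresh scanner state unchanged
lemma scan_all_space : ∀ (l : List Char), (∀ c ∈ l, PySem.Chars.isspace c = true) →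
    ∀ (n : List Int) (i : List String),
      l.foldl pvScanStep ((n, i), ([], [])) = ((n, i), ([], [])) := by
  intro l
  induction l with
  | nil => intro _ n i; rfl
  | cons ch rest ih =>
    intro h n i
    have hsp : PySem.Chars.isspace ch = true := h ch (List.mem_cons_self ..)
    have hch : ¬ ch = ',' := by
      intro hc
      subst hc
      exact absurd hsp (by decide)
    rw [List.foldl_cons]
    have step : pvScanStep ((n, i), ([], [])) ch = ((n, i), ([], [])) := by
      simp [pvScanStep, hch, hsp]
    rw [step]
    exact ih (fun c hc => h c (List.mem_cons_of_mem _ hc)) n i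

-- scanner over a full comma-free token starting fresh: it computes strip l
lemma scan_token (l : List Char) (hl : ',' ∉ l) (n : List Int) (i : List String) :
    ∃ tr', l.foldl pvScanStep ((n, i), ([], [])) = ((n, i), (PySem.Chars.strip l, tr')) := by
  by_cases hall : ∀ c ∈ l, PySem.Chars.isspace c = true
  · exact ⟨[], by rw [scan_all_space l hall, (strip_nil_iff l).2 hall]⟩
  · have hdne : l.dropWhile PySem.Chars.isspace ≠ [] := by
      intro h0
      exact hall (by simpa [List.dropWhile_eq_nil_iff] using h0)
    obtain ⟨ch, rest, hd⟩ := List.exists_cons_of_ne_nil hdne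
    have hchsp : PySem.Chars.isspace ch = false := by
      have h1 := List.head?_dropWhile_not PySem.Chars.isspace l
      rw [hd] at h1
      simpa using h1
    have hmem : ch ∈ l :=
      (List.dropWhile_sublist (l := l) (p := PySem.Chars.isspace)).subset
        (hd ▸ List.mem_cons_self ..)
    have hchc : ¬ ch = ',' := fun hc => hl (hc ▸ hmem)
    have hrest : ',' ∉ rest := by
      intro hr
      exact hl ((List.dropWhile_sublist (l := l) (p := PySem.Chars.isspace)).subset
        (hd ▸ List.mem_cons_of_mem _ hr))
    obtain ⟨tr', _htr', heq⟩ := scan_chunk rest hrest n i [ch] [] (by simp) (by simp)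
    refine ⟨tr', ?_⟩
    calc l.foldl pvScanStep ((n, i), ([], []))
        = (l.takeWhile PySem.Chars.isspace ++ l.dropWhile PySem.Chars.isspace).foldl
            pvScanStep ((n, i), ([], [])) := by rw [List.takeWhile_append_dropWhile]
      _ = (l.dropWhile PySem.Chars.isspace).foldl pvScanStep ((n, i), ([], [])) := by
            rw [List.foldl_append,
                scan_all_space _ (fun c hc => List.mem_takeWhile_imp hc) n i]
      _ = (ch :: rest).foldl pvScanStep ((n, i), ([], [])) := by rw [hd]
      _ = rest.foldl pvScanStep ((n, i), ([ch], [])) := by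
            rw [List.foldl_cons]
            have step : pvScanStep ((n, i), ([], [])) ch = ((n, i), ([ch], [])) := by
              simp [pvScanStep, hchc, hchsp]
            rw [step]
      _ = ((n, i), ([ch] ++ PySem.Chars.rstrip ([] ++ rest), tr')) := heq
      _ = ((n, i), (PySem.Chars.strip l, tr')) := by
            have hstrip : PySem.Chars.strip l = ch :: PySem.Chars.rstrip rest := by
              rw [PySem.Chars.strip, PySem.Chars.lstrip, hd]
              exact rstrip_append_nonspace [] ch rest hchsp
            rw [hstrip]
            simp

-- the scanner over (tokens each followed by ',') is A's classifying fold
lemma scan_tokens : ∀ (toks : List (List Char)), (∀ t ∈ toks, ',' ∉ t) →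
    ∀ (st : List Int × List String),
      (toks.flatMap (fun t => t ++ [','])).foldl pvScanStep (st, ([], [])) =
        (toks.foldl pvClassify st, ([], [])) := by
  intro toks
  induction toks with
  | nil => intro _ st; rfl
  | cons t ts ih =>
    intro h st
    obtain ⟨n, i⟩ := st
    simp only [List.flatMap_cons, List.foldl_cons, List.foldl_append]
    obtain ⟨tr', heq⟩ := scan_token t (h t (List.mem_cons_self ..)) n i
    rw [heq]
    have step : pvScanStep ((n, i), (PySem.Chars.strip t, tr')) ','
        = (pvClassify (n, i) t, ([], [])) := by
      by_cases hstrip : PySem.Chars.strip t = []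
      · simp [pvScanStep, pvClassify, hstrip]
      · cases hof : PySem.Int.ofChars? (PySem.Chars.strip t) <;>
          simp [pvScanStep, pvClassify, hstrip, hof]
    rw [step, List.foldl_nil]
    exact ih (fun t' ht' => h t' (List.mem_cons_of_mem _ ht')) (pvClassify (n, i) t)

lemma classify_all_space (toks : List (List Char))
    (h : ∀ t ∈ toks, PySem.Chars.strip t = []) (st : List Int × List String) :
    toks.foldl pvClassify st = st := by
  induction toks generalizing st with
  | nil => rfl
  | cons t ts ih =>
    rw [List.foldl_cons]
    have ht := h t (List.mem_cons_self ..)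
    have : pvClassify st t = st := by simp [pvClassify, ht]
    rw [this]
    exact ih (fun t' ht' => h t' (List.mem_cons_of_mem _ ht')) st

-- ===== VERDICT (by name: the statement is the Claim_ definition above) =====
theorem parse_csv_enteros_py_spec : Claim_equal_parse_csv_enteros_py := by
  intro texto _
  unfold Spec_parse_csv_enteros_py parse_csv_enteros_py parse_csv_enteros_py_alt
  have hB : ((texto.toList ++ [',']).foldl pvScanStep (([], []), ([], []))).1
      = (pvSplitComma texto.toList).foldl pvClassify ([], []) := by
    rw [← pvSplitComma_flatten texto.toList,
        scan_tokens _ (pvSplitComma_no_comma texto.toList) ([], [])]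
  rw [hB]
  by_cases hs : PySem.Chars.strip texto.toList = []
  · rw [if_pos hs]
    rw [classify_all_space _ (fun t ht => (strip_nil_iff t).2
        (fun c hc => (strip_nil_iff texto.toList).1 hs c
          (pvSplitComma_mem_chars texto.toList t ht c hc)))]
  · rw [if_neg hs, splitOn_eq_pvSplitComma]
    rfl
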